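-- pv_equiv track=rewrite | github.com/Vitor-Garcia-Comissoli/Codes_from_MAC0110 | MAC 0110/Exercícios para as Aulas/Exercício 10 - Palavra mais longa/ex10.py | maior_palavra
-- ===== SOURCE A (Python) =====
-- def maior_palavra(s):
--
--     len_maior = 0
--     maior = ""
--
--     len_p = 0
--     palavra = ""
--
--     n = len(s)
--     for i in range(0, n, 1):
--         c = s[i]
--
--     # for c in s:
--         if c.isalpha(): # in Letras:
--             len_p += 1
--             palavra = palavra + c
--
--         else:
--             len_p = 0
--             palavra = ""
--
--         if len_p > len_maior:
--             len_maior = len_p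
--             maior = palavra
--
--     return maior
-- ===== SOURCE B (Python) =====
-- from itertools import groupby
--
-- def maior_palavra(s):
--     runs = ["".join(g) for k, g in groupby(s, key=str.isalpha) if k]
--     return max(runs, key=len, default="")
-- ===== Notes on version B (the rewrite author's own statement) =====
-- stated objective: simpler
-- what changed: Replaces A's single-pass incremental len_p/maior tracking with a two-phase decomposition: split the string into maximal alphabetic runs via itertools.groupby, then pick the first longest with max keyed by len (empty default for letterless input).
import Mathlib
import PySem

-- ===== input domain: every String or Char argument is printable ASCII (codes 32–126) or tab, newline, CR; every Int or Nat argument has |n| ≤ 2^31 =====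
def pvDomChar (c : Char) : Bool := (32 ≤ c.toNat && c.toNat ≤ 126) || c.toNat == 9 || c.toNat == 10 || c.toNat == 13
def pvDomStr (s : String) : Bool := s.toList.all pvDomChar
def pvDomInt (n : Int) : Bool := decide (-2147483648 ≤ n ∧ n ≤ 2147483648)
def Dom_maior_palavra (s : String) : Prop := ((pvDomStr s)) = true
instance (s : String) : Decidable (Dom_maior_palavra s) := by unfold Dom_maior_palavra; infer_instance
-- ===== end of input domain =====

-- B replaces A's incremental longest-run tracking with a two-phase structure: split the
-- string into maximal alphabetic runs (itertools.groupby), then take the first longest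
-- (max with key=len); objective: simpler.


-- ===== PORT A =====
-- one loop step of A: state = (len_maior, maior, len_p, palavra); strings kept as List Char
def maiorStep (st : Nat × List Char × Nat × List Char) (c : Char) :
    Nat × List Char × Nat × List Char :=
  let (len_maior, maior, len_p, palavra) := st
  let (len_p, palavra) :=
    if PySem.Chars.isalpha c then (len_p + 1, palavra ++ [c]) else (0, ([] : List Char))
  if len_maior < len_p then (len_p, palavra, len_p, palavra)
  else (len_maior, maior, len_p, palavra)

def maior_palavra (s : String) : String :=
  -- for i in range(0, n, 1): c = s[i]  — the loop reads the characters of s in order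
  String.ofList (s.toList.foldl maiorStep (0, [], 0, [])).2.1

-- ===== PORT B =====
-- groupby(s, key=str.isalpha) keeping only the alphabetic groups: the maximal alphabetic runs
def altRuns (cs : List Char) : List (List Char) :=
  match cs with
  | [] => []
  | c :: rest =>
    if PySem.Chars.isalpha c then
      (c :: rest.takeWhile PySem.Chars.isalpha) :: altRuns (rest.dropWhile PySem.Chars.isalpha)
    else altRuns rest
termination_by cs.length
decreasing_by
  · exact Nat.lt_succ_of_le (List.length_dropWhile_le _ _)
  · exact Nat.lt_succ_self _

def maior_palavra_alt (s : String) : String :=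
  -- max(runs, key=len, default="")
  String.ofList (PySem.List.maxD (altRuns s.toList) List.length [])

-- ===== PRECONDITION & SPEC =====
def Spec_maior_palavra (s : String) (out : String) : Prop := out = maior_palavra_alt s
instance (s : String) (out : String) : Decidable (Spec_maior_palavra s out) := by unfold Spec_maior_palavra; infer_instance

-- ===== CLAIM (what is proved, stated in full; the proofs are below) =====
def Claim_equal_maior_palavra : Prop := ∀ (s : String), Dom_maior_palavra s → Spec_maior_palavra s (maior_palavra s)

-- ===== LEMMAS AND PROOFS =====

-- the running-max step of B's selection, on lists of chars keyed by length
def runMax (m r : List Char) : List Char := if m.length < r.length then r else m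

-- A's loop over an all-alphabetic block r grows palavra to p ++ r and updates maior
-- to it exactly when it gets longer than maior.
lemma foldl_maiorStep_alpha (r : List Char) (h : ∀ c ∈ r, PySem.Chars.isalpha c = true) :
    ∀ (m p : List Char), p.length ≤ m.length →
      List.foldl maiorStep (m.length, m, p.length, p) r =
        ((runMax m (p ++ r)).length, runMax m (p ++ r), (p ++ r).length, p ++ r) := by
  induction r with
  | nil =>
    intro m p hpm
    simp [runMax, Nat.not_lt.mpr hpm]
  | cons c r' ih =>
    intro m p hpm
    have hc : PySem.Chars.isalpha c = true := h c (List.mem_cons_self)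
    have hr' : ∀ c ∈ r', PySem.Chars.isalpha c = true := fun x hx => h x (List.mem_cons_of_mem _ hx)
    simp only [List.foldl_cons, maiorStep, hc, if_true]
    by_cases hcmp : m.length < p.length + 1
    · have hm : m.length = p.length := by omega
      have : (if m.length < p.length + 1 then
          (p.length + 1, p ++ [c], p.length + 1, p ++ [c])
        else (m.length, m, p.length + 1, p ++ [c])) =
          ((p ++ [c]).length, p ++ [c], (p ++ [c]).length, p ++ [c]) := by
        simp [hcmp]
      rw [this, ih hr' (p ++ [c]) (p ++ [c]) (le_refl _)]
      have hrm : runMax (p ++ [c]) (p ++ c :: r') = p ++ c :: r' := by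
        cases r' with
        | nil => simp [runMax]
        | cons d r'' =>
          unfold runMax
          rw [if_pos (by simp)]
      have hrm2 : runMax m (p ++ c :: r') = p ++ c :: r' := by
        unfold runMax
        rw [if_pos (by simp; omega)]
      simp [hrm, hrm2]
    · have : (if m.length < p.length + 1 then
          (p.length + 1, p ++ [c], p.length + 1, p ++ [c])
        else (m.length, m, p.length + 1, p ++ [c])) =
          (m.length, m, (p ++ [c]).length, p ++ [c]) := by
        simp [hcmp]
      rw [this, ih hr' m (p ++ [c]) (by simp; omega)]
      simp [runMax]

-- A's whole loop, started at a run boundary (palavra = ""), computes B's running max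
-- over the alphabetic runs of the remaining input.
lemma foldl_maiorStep_runs (cs : List Char) :
    ∀ (m : List Char),
      (List.foldl maiorStep (m.length, m, 0, ([] : List Char)) cs).2.1 =
        List.foldl runMax m (altRuns cs) := by
  induction cs using altRuns.induct with
  | case1 => intro m; simp [altRuns]
  | case2 c rest hc ih =>
    intro m
    have hsplit : rest.takeWhile PySem.Chars.isalpha ++ rest.dropWhile PySem.Chars.isalpha = rest :=
      List.takeWhile_append_dropWhile
    have halpha : ∀ x ∈ c :: rest.takeWhile PySem.Chars.isalpha, PySem.Chars.isalpha x = true := by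
      intro x hx
      rcases List.mem_cons.mp hx with h | h
      · subst h; exact hc
      · exact List.mem_takeWhile_imp h
    have hrun := foldl_maiorStep_alpha (c :: rest.takeWhile PySem.Chars.isalpha) halpha m [] (by simp)
    simp only [List.length_nil, List.nil_append] at hrun
    have hcs : c :: rest =
        (c :: rest.takeWhile PySem.Chars.isalpha) ++ rest.dropWhile PySem.Chars.isalpha := by
      simp [hsplit]
    rw [altRuns]
    simp only [hc, if_true]
    rw [hcs, List.foldl_append, hrun]
    simp only [List.foldl_cons]
    -- now process the remainder, whose head (if any) is not alphabetic
    set M := runMax m (c :: rest.takeWhile PySem.Chars.isalpha) with hM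
    cases hd : rest.dropWhile PySem.Chars.isalpha with
    | nil => simp [altRuns]
    | cons e d' =>
      have he : PySem.Chars.isalpha e = false := by
        have := List.head?_dropWhile_not PySem.Chars.isalpha rest
        rw [hd] at this; simpa using this
      have hruns : altRuns (e :: d') = altRuns d' := by
        rw [altRuns]; simp [he]
      have ih' := ih M
      rw [hd] at ih'
      rw [hruns] at ih' ⊢
      simp only [List.foldl_cons, maiorStep, he] at ih' ⊢
      simpa using ih'
  | case3 c rest hc ih =>
    intro m
    rw [altRuns]
    simp only [hc, Bool.false_eq_true, if_false]
    simp only [List.foldl_cons, maiorStep, hc]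
    simpa using ih m

-- every run produced by altRuns is nonempty
lemma altRuns_ne_nil (cs : List Char) : ∀ r ∈ altRuns cs, r ≠ [] := by
  induction cs using altRuns.induct with
  | case1 => simp [altRuns]
  | case2 c rest hc ih =>
    rw [altRuns]; simp only [hc, if_true]
    intro r hr
    rcases List.mem_cons.mp hr with h | h
    · subst h; simp
    · exact ih r h
  | case3 c rest hc ih =>
    rw [altRuns]; simp only [hc, Bool.false_eq_true, if_false]; exact ih

-- B's max? over a nonempty list is the running-max fold from its head
lemma max?_foldl (rs : List (List Char)) : ∀ (r : List Char),
    PySem.List.max? (r :: rs) List.length = some (List.foldl runMax r rs) := by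
  induction rs with
  | nil => intro r; rfl
  | cons x rs' ih =>
    intro r
    have h1 : PySem.List.max? (r :: x :: rs') List.length
        = PySem.List.max? (runMax r x :: rs') List.length := by
      simp only [PySem.List.max?, List.foldl_cons]
      congr 1
      unfold runMax
      by_cases hc : r.length < x.length
      · simp [hc]
      · simp [hc]
    rw [h1, ih (runMax r x)]
    simp only [List.foldl_cons]

-- the running max from "" equals B's max-with-default over nonempty runs
lemma foldl_runMax_eq_maxD (rs : List (List Char)) (h : ∀ r ∈ rs, r ≠ []) :
    List.foldl runMax [] rs = PySem.List.maxD rs List.length [] := by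
  cases rs with
  | nil => rfl
  | cons r rs' =>
    have hr : r ≠ [] := h r List.mem_cons_self
    have h0 : ([] : List Char).length < r.length := by
      cases r with
      | nil => exact absurd rfl hr
      | cons _ _ => simp
    simp only [List.foldl_cons]
    rw [show runMax [] r = r from by unfold runMax; rw [if_pos h0]]
    unfold PySem.List.maxD
    rw [max?_foldl rs' r]
    rfl

-- ===== VERDICT (by name: the statement is the Claim_ definition above) =====
theorem maior_palavra_spec : Claim_equal_maior_palavra := by
  intro s _
  unfold Spec_maior_palavra maior_palavra maior_palavra_alt
  have h := foldl_maiorStep_runs s.toList []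
  simp only [List.length_nil] at h
  rw [h, foldl_runMax_eq_maxD _ (altRuns_ne_nil s.toList)]
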